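-- pv_equiv track=rewrite | github.com/NweTwist/DiplomFOR | export_first_chapter_docx.py | _extract_first_chapter
-- ===== SOURCE A (Python) =====
-- from typing import List, Optional, Tuple
--
-- def _extract_first_chapter(md_text: str) -> str:
--     lines = md_text.splitlines()
--
--     start_idx: Optional[int] = None
--     for i, line in enumerate(lines):
--         if line.startswith("## 2."):
--             start_idx = i
--             break
--
--     if start_idx is None:
--         # Fallback: return whole document
--         return md_text
--
--     end_idx = len(lines)
--     for j in range(start_idx + 1, len(lines)):
--         if lines[j].startswith("## ") and not lines[j].startswith("## 2."):
--             end_idx = j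
--             break
--
--     return "\n".join(lines[start_idx:end_idx]).strip() + "\n"
-- ===== SOURCE B (Python) =====
-- def _extract_first_chapter(md_text: str) -> str:
--     collected = None
--     for line in md_text.splitlines():
--         if collected is None:
--             if line.startswith("## 2."):
--                 collected = [line]
--         elif line.startswith("## ") and not line.startswith("## 2."):
--             break
--         else:
--             collected.append(line)
--     if collected is None:
--         return md_text
--     return "\n".join(collected).strip() + "\n"
-- ===== Notes on version B (the rewrite author's own statement) =====
-- stated objective: simpler
-- what changed: Replaces A's two locate-passes (find start index, rescan by index for the end, then slice and join) with one accumulate-while-scanning pass over the lines that carries the collected chapter lines directly, with no indices or slicing.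
import Mathlib
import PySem

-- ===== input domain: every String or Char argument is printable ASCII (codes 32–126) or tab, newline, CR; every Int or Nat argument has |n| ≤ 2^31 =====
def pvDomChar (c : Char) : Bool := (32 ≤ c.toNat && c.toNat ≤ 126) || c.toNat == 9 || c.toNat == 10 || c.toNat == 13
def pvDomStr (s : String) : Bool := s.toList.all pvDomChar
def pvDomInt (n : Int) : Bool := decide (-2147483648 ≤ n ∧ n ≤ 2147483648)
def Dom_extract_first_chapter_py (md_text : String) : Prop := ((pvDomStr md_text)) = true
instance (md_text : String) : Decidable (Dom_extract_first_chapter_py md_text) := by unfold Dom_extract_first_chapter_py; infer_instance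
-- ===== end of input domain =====

-- B replaces A's two locate-passes (find start index, index-scan for the end, slice) with one
-- accumulate-while-scanning pass carrying the collected lines; objective: simpler (same cost).

-- ===== PORT A =====
-- first loop of A: `for i, line in enumerate(lines): if line.startswith("## 2."): start_idx = i; break`
def pvFindStartA : Int → List String → Option Int
  | _, [] => none
  | i, line :: rest =>
    if PySem.Str.startswith line "## 2." then some i else pvFindStartA (i + 1) rest

-- second loop of A over `range(start_idx+1, len(lines))`; base case is the initial `end_idx = len(lines)`
def pvFindEndA (lines : List String) : List Int → Int
  | [] => (lines.length : Int)
  | j :: rest =>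
    if PySem.Str.startswith (PySem.List.pyGetD lines j "") "## " &&
        !PySem.Str.startswith (PySem.List.pyGetD lines j "") "## 2." then j
    else pvFindEndA lines rest

def extract_first_chapter_py (md_text : String) : String :=
  let lines := PySem.Str.splitlines md_text
  match pvFindStartA 0 lines with
  | none => md_text
  | some start_idx =>
    let end_idx := pvFindEndA lines (PySem.List.pyRange (start_idx + 1) (lines.length : Int) 1)
    PySem.Str.strip (PySem.Str.join "\n" (PySem.List.slice lines (some start_idx) (some end_idx))) ++ "\n"

-- ===== PORT B =====
-- B's single loop; the state is `collected` (None before the "## 2." header is seen)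
def pvScanB : Option (List String) → List String → Option (List String)
  | acc, [] => acc
  | none, line :: rest =>
    if PySem.Str.startswith line "## 2." then pvScanB (some [line]) rest
    else pvScanB none rest
  | some c, line :: rest =>
    if PySem.Str.startswith line "## " && !PySem.Str.startswith line "## 2." then some c
    else pvScanB (some (c ++ [line])) rest

def extract_first_chapter_py_alt (md_text : String) : String :=
  match pvScanB none (PySem.Str.splitlines md_text) with
  | none => md_text
  | some collected => PySem.Str.strip (PySem.Str.join "\n" collected) ++ "\n"

-- ===== PRECONDITION & SPEC =====
def Spec_extract_first_chapter_py (md_text : String) (out : String) : Prop := out = extract_first_chapter_py_alt md_text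
instance (md_text : String) (out : String) : Decidable (Spec_extract_first_chapter_py md_text out) := by unfold Spec_extract_first_chapter_py; infer_instance

-- ===== CLAIM (what is proved, stated in full; the proofs are below) =====
def Claim_equal_extract_first_chapter_py : Prop := ∀ (md_text : String), Dom_extract_first_chapter_py md_text → Spec_extract_first_chapter_py md_text (extract_first_chapter_py md_text)

-- ===== LEMMAS AND PROOFS =====

-- proof-side abbreviations for the two line predicates
def pvHdr (l : String) : Bool := PySem.Str.startswith l "## 2."
def pvStop (l : String) : Bool := PySem.Str.startswith l "## " && !PySem.Str.startswith l "## 2."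

-- the chapter body after the header, as B collects it
def pvTake : List String → List String
  | [] => []
  | l :: rest => if pvStop l then [] else l :: pvTake rest

theorem pvScanB_some (xs : List String) : ∀ (c : List String),
    pvScanB (some c) xs = some (c ++ pvTake xs) := by
  induction xs with
  | nil => intro c; simp [pvScanB, pvTake]
  | cons l rest ih =>
    intro c
    simp only [pvScanB, pvTake]
    by_cases h : pvStop l = true
    · have h' : (PySem.Str.startswith l "## " && !PySem.Str.startswith l "## 2.") = true := h
      rw [if_pos h', if_pos h]
      simp
    · have h' : ¬ (PySem.Str.startswith l "## " && !PySem.Str.startswith l "## 2.") = true := h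
      rw [if_neg h', if_neg h, ih]
      simp

theorem pvTake_take (xs : List String) : xs.take (pvTake xs).length = pvTake xs := by
  induction xs with
  | nil => simp [pvTake]
  | cons l rest ih =>
    by_cases h : pvStop l = true
    · simp [pvTake, h]
    · simp [pvTake, h, ih]

theorem pvFindStartA_none (xs : List String) : ∀ (i : Int),
    pvFindStartA i xs = none ↔ ∀ l ∈ xs, pvHdr l = false := by
  induction xs with
  | nil => intro i; simp [pvFindStartA]
  | cons l rest ih =>
    intro i
    simp only [pvFindStartA, List.mem_cons, forall_eq_or_imp]
    by_cases h : pvHdr l = true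
    · have h' : PySem.Str.startswith l "## 2." = true := h
      rw [if_pos h']
      constructor
      · intro hc; cases hc
      · intro hall; rw [hall.1] at h; cases h
    · have h0 : pvHdr l = false := by revert h; cases pvHdr l <;> simp
      have h' : ¬ PySem.Str.startswith l "## 2." = true := h
      rw [if_neg h', ih (i + 1)]
      simp [h0]

theorem pvScanB_none (xs : List String) (h : ∀ l ∈ xs, pvHdr l = false) :
    pvScanB none xs = none := by
  induction xs with
  | nil => simp [pvScanB]
  | cons l rest ih =>
    have hl : PySem.Str.startswith l "## 2." = false := h l (by simp)
    simp only [pvScanB]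
    rw [hl, if_neg (by simp)]
    exact ih (fun x hx => h x (by simp [hx]))

theorem pvFindStartA_some (xs : List String) : ∀ (i r : Int),
    pvFindStartA i xs = some r →
    ∃ pre l post, xs = pre ++ l :: post ∧ (∀ x ∈ pre, pvHdr x = false) ∧
      pvHdr l = true ∧ r = i + (pre.length : Int) := by
  induction xs with
  | nil => intro i r h; simp [pvFindStartA] at h
  | cons l rest ih =>
    intro i r h
    simp only [pvFindStartA] at h
    by_cases hl : pvHdr l = true
    · rw [if_pos (show PySem.Str.startswith l "## 2." = true from hl)] at h
      refine ⟨[], l, rest, rfl, by simp, hl, ?_⟩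
      have := Option.some.inj h
      simp [← this]
    · rw [if_neg (show ¬ PySem.Str.startswith l "## 2." = true from hl)] at h
      obtain ⟨pre, l', post, hx, hpre, hl', hr⟩ := ih (i + 1) r h
      have h0 : pvHdr l = false := by revert hl; cases pvHdr l <;> simp
      refine ⟨l :: pre, l', post, by simp [hx], ?_, hl', ?_⟩
      · intro x hx'
        rcases List.mem_cons.mp hx' with h1 | h1
        · rw [h1]; exact h0
        · exact hpre x h1
      · rw [hr]; simp only [List.length_cons]; push_cast; ring

theorem pvFindEndA_char (lines : List String) : ∀ (n k : Nat),
    lines.length - k = n → k ≤ lines.length →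
    pvFindEndA lines (PySem.List.pyRange (k : Int) (lines.length : Int) 1) =
      ((k + (pvTake (lines.drop k)).length : Nat) : Int) := by
  intro n
  induction n with
  | zero =>
    intro k hn hk
    have hk' : k = lines.length := by omega
    rw [PySem.List.pyRange_one_eq_nil (by exact_mod_cast Nat.le_of_eq hk'.symm)]
    simp [pvFindEndA, hk', pvTake]
  | succ m ih =>
    intro k hn hk
    have hklt : k < lines.length := by omega
    rw [PySem.List.pyRange_one_cons (by exact_mod_cast hklt)]
    have hdropk : lines.drop k = lines[k] :: lines.drop (k + 1) := List.drop_eq_getElem_cons hklt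
    have hget : PySem.List.pyGetD lines (k : Int) "" = lines[k] := by
      rw [PySem.List.pyGetD_natCast]
      exact List.getD_eq_getElem lines "" hklt
    simp only [pvFindEndA, hget]
    by_cases hs : pvStop lines[k] = true
    · rw [if_pos (show (PySem.Str.startswith lines[k] "## " &&
          !PySem.Str.startswith lines[k] "## 2.") = true from hs)]
      rw [hdropk]
      simp only [pvTake, if_pos hs]
      simp
    · rw [if_neg (show ¬ (PySem.Str.startswith lines[k] "## " &&
          !PySem.Str.startswith lines[k] "## 2.") = true from hs)]
      have : ((k : Int) + 1) = ((k + 1 : Nat) : Int) := by push_cast; ring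
      rw [this, ih (k + 1) (by omega) (by omega)]
      rw [hdropk]
      simp only [pvTake, if_neg hs, List.length_cons]
      push_cast
      ring

-- ===== VERDICT (by name: the statement is the Claim_ definition above) =====
theorem extract_first_chapter_py_spec : Claim_equal_extract_first_chapter_py := by
  intro md_text _
  show extract_first_chapter_py md_text = extract_first_chapter_py_alt md_text
  simp only [extract_first_chapter_py, extract_first_chapter_py_alt]
  cases hstart : pvFindStartA 0 (PySem.Str.splitlines md_text) with
  | none =>
    rw [pvScanB_none _ ((pvFindStartA_none (PySem.Str.splitlines md_text) 0).mp hstart)]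
  | some s =>
    obtain ⟨pre, l, post, hx, hpre, hl, hr⟩ :=
      pvFindStartA_some (PySem.Str.splitlines md_text) 0 s hstart
    have hscan : pvScanB none (PySem.Str.splitlines md_text) = some (l :: pvTake post) := by
      rw [hx]
      clear hx hr hstart
      induction pre with
      | nil =>
        simp only [List.nil_append, pvScanB]
        rw [if_pos (show PySem.Str.startswith l "## 2." = true from hl)]
        rw [pvScanB_some]
        simp
      | cons p ps ih =>
        have hp : PySem.Str.startswith p "## 2." = false := hpre p (by simp)
        simp only [List.cons_append, pvScanB]
        rw [hp, if_neg (by simp)]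
        exact ih (fun x hx => hpre x (by simp [hx]))
    rw [hscan]
    -- A's side: compute the slice
    have hs : s = ((pre.length : Nat) : Int) := by simpa using hr
    have hlen : (PySem.Str.splitlines md_text).length = pre.length + 1 + post.length := by
      simp [hx]; omega
    have hdrop1 : (PySem.Str.splitlines md_text).drop (pre.length + 1) = post := by
      rw [show PySem.Str.splitlines md_text = (pre ++ [l]) ++ post by simp [hx],
        show pre.length + 1 = (pre ++ [l]).length by simp]
      exact List.drop_left
    have hdrop0 : (PySem.Str.splitlines md_text).drop pre.length = l :: post := by
      rw [hx]; exact List.drop_left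
    have hsucc : s + 1 = ((pre.length + 1 : Nat) : Int) := by rw [hs]; push_cast; ring
    have hend : pvFindEndA (PySem.Str.splitlines md_text)
        (PySem.List.pyRange (s + 1) ((PySem.Str.splitlines md_text).length : Int) 1) =
        ((pre.length + 1 + (pvTake post).length : Nat) : Int) := by
      rw [hsucc, pvFindEndA_char (PySem.Str.splitlines md_text)
        ((PySem.Str.splitlines md_text).length - (pre.length + 1)) (pre.length + 1) rfl (by omega),
        hdrop1]
    have hslice : PySem.List.slice (PySem.Str.splitlines md_text) (some s)
        (some (pvFindEndA (PySem.Str.splitlines md_text)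
          (PySem.List.pyRange (s + 1) ((PySem.Str.splitlines md_text).length : Int) 1))) =
        l :: pvTake post := by
      rw [hend, hs, PySem.List.slice_natCast, hdrop0]
      rw [show pre.length + 1 + (pvTake post).length - pre.length = (pvTake post).length + 1 by omega]
      simp only [List.take_succ_cons]
      rw [pvTake_take]
    exact congrArg (fun c => PySem.Str.strip (PySem.Str.join "\n" c) ++ "\n") hslice
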